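-- pv_equiv track=rewrite | github.com/rajeshwarideoraj/CodeGuru_Drona | participant_files/hard_lab_Aneesh.py | orderUp
-- ===== SOURCE A (Python) =====
-- def separateOrders(str):
--     if (str.find(",") == -1):
--         return [str]
--     return [str[: str.find(",")]] + separateOrders(str[str.find(",") + 2:])
--
-- def onePlateToAnother(pancakes):
--     if (len(pancakes) == 0):
--         return []
--     else:
--         return [pancakes[len(pancakes) - 1]] + onePlateToAnother(pancakes[:len(pancakes) - 1])
--
-- def orderUp(totalNum, orders):
--     ordersLength = len(orders)
--     resultStr = ""
--     if ordersLength == 0: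
--         return ""
--     orderedList = separateOrders(orders[0])
--     orderFlip = onePlateToAnother(orderedList)
--     resultStr = "Order #{} your order of {} pancakes is up!".format(totalNum - ordersLength + 1, orderFlip)
--     return resultStr + "\n" + orderUp(totalNum, orders[1:])
-- ===== SOURCE B (Python) =====
-- def orderUp(totalNum, orders):
--     n = len(orders)
--     out = []
--     for i, order in enumerate(orders):
--         parts = []
--         buf = []
--         j = 0
--         while j < len(order):
--             c = order[j]
--             if c == ',':
--                 parts.append(''.join(buf))
--                 buf = []
--                 j += 2
--             else:
--                 buf.append(c)
--                 j += 1
--         parts.append(''.join(buf))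
--         parts.reverse()
--         out.append("Order #{} your order of {} pancakes is up!\n".format(totalNum - n + 1 + i, parts))
--     return ''.join(out)
-- ===== Notes on version B (the rewrite author's own statement) =====
-- stated objective: faster
-- what changed: Replaced A's recursive slicing (separateOrders re-slicing the string at each comma, onePlateToAnother copying the list per element, and orderUp recursing on orders[1:]) with a single iterative pass per order using an index pointer, list.reverse, and one enumerate loop that joins the lines.
import Mathlib
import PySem

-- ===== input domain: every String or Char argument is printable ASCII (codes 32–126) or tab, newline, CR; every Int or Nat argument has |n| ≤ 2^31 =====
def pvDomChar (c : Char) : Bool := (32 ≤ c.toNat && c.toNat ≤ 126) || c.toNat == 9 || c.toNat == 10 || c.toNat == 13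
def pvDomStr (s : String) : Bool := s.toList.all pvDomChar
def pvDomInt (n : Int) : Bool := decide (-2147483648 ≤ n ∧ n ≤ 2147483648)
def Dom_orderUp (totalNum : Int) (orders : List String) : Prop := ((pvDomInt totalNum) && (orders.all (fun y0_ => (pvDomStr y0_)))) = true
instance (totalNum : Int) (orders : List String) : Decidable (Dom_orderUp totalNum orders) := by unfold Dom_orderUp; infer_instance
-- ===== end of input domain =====

-- B replaces A's quadratic recursive slicing (separateOrders / onePlateToAnother / tail recursion
-- on orders[1:]) by one iterative pass with an index pointer per order plus List.reverse; objective: faster.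

-- Shared formatting helper: Python's "{}".format(...) of a list of strings, i.e. repr of a
-- list of str (exact on the Dom alphabet: printable ASCII plus tab/newline/CR, which repr
-- escapes as \t, \n, \r; quote choice and backslash/quote escaping as in CPython).
def pyReprChars (s : List Char) : List Char :=
  let q : Char := if '\'' ∈ s ∧ '"' ∉ s then '"' else '\''
  q :: (s.flatMap (fun c =>
    if c = '\\' then ['\\', '\\']
    else if c = '\t' then ['\\', 't']
    else if c = '\n' then ['\\', 'n']
    else if c = '\r' then ['\\', 'r']
    else if c = q then ['\\', q]
    else [c])) ++ [q]

def pyReprList (ps : List (List Char)) : List Char :=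
  '[' :: (List.intercalate [',', ' '] (ps.map pyReprChars)) ++ [']']

-- "Order #{} your order of {} pancakes is up!".format(k, parts)
def fmtMsg (k : Int) (parts : List (List Char)) : List Char :=
  "Order #".toList ++ PySem.Int.toChars k ++ " your order of ".toList
    ++ pyReprList parts ++ " pancakes is up!".toList

-- ===== PORT A =====
-- separateOrders: recursive split at the first ',' (str.find = List.findIdx?, -1/none when
-- absent), keeping str[:find] and recursing on str[find+2:] (drop of comma plus one char).
def sepA (cs : List Char) : List (List Char) :=
  match h : cs.findIdx? (· = ',') with
  | none => [cs]
  | some i => cs.take i :: sepA (cs.drop (i + 2))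
termination_by cs.length
decreasing_by
  have hne : cs ≠ [] := by rintro rfl; simp at h
  have : 0 < cs.length := List.length_pos_iff.mpr hne
  simp [List.length_drop]; omega

-- onePlateToAnother: [pancakes[-1]] + recurse on pancakes[:-1]
def optaA (l : List (List Char)) : List (List Char) :=
  if h : l = [] then [] else l.getLast h :: optaA l.dropLast
termination_by l.length
decreasing_by
  have : 0 < l.length := List.length_pos_iff.mpr h
  simp [List.length_dropLast]; omega

-- orderUp's recursion, on List Char (strings bridged via toList/String.ofList once, outside)
def orderUpA (totalNum : Int) (orders : List (List Char)) : List Char :=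
  match orders with
  | [] => []
  | o :: rest =>
      let orderedList := sepA o
      let orderFlip := optaA orderedList
      let resultStr := fmtMsg (totalNum - ((o :: rest).length : Int) + 1) orderFlip
      resultStr ++ ['\n'] ++ orderUpA totalNum rest

def orderUp (totalNum : Int) (orders : List String) : String :=
  String.ofList (orderUpA totalNum (orders.map String.toList))

-- ===== PORT B =====
-- single left-to-right scan with an accumulator buffer; on ',' close the part and skip one char
def splitB (buf : List Char) (cs : List Char) : List (List Char) :=
  match cs with
  | [] => [buf]
  | c :: rest =>
      if c = ',' then buf :: splitB [] (rest.drop 1)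
      else splitB (buf ++ [c]) rest
termination_by cs.length
decreasing_by
  · simp
  · simp

def orderUp_alt (totalNum : Int) (orders : List String) : String :=
  let n : Int := orders.length
  String.ofList ((PySem.List.enumerate orders).flatMap (fun p =>
    fmtMsg (totalNum - n + 1 + p.1) ((splitB [] p.2.toList).reverse) ++ ['\n']))

-- ===== PRECONDITION & SPEC =====
def Spec_orderUp (totalNum : Int) (orders : List String) (out : String) : Prop := out = orderUp_alt totalNum orders
instance (totalNum : Int) (orders : List String) (out : String) : Decidable (Spec_orderUp totalNum orders out) := by unfold Spec_orderUp; infer_instance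

-- ===== CLAIM (what is proved, stated in full; the proofs are below) =====
def Claim_equal_orderUp : Prop := ∀ (totalNum : Int) (orders : List String), Dom_orderUp totalNum orders → Spec_orderUp totalNum orders (orderUp totalNum orders)

-- ===== LEMMAS AND PROOFS =====

-- no comma in cs → the scan just appends cs to the buffer
theorem splitB_no_comma (cs : List Char) (hc : ∀ c ∈ cs, c ≠ ',') :
    ∀ buf, splitB buf cs = [buf ++ cs] := by
  induction cs with
  | nil => intro buf; simp [splitB]
  | cons c rest ih =>
      intro buf
      have hc' : c ≠ ',' := hc c (by simp)
      rw [splitB]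
      simp only [if_neg hc']
      rw [ih (fun x hx => hc x (by simp [hx]))]
      simp

-- no comma in t → the scan crosses t, closes the part at ',', and skips one char
theorem splitB_across (t r : List Char) (ht : ∀ c ∈ t, c ≠ ',') :
    ∀ buf, splitB buf (t ++ ',' :: r) = (buf ++ t) :: splitB [] (r.drop 1) := by
  induction t with
  | nil => intro buf; simp [splitB]
  | cons c t' ih =>
      intro buf
      have hc' : c ≠ ',' := ht c (by simp)
      rw [List.cons_append, splitB]
      simp only [if_neg hc']
      rw [ih (fun x hx => ht x (by simp [hx]))]
      simp

theorem sepA_eq_splitB_aux (n : Nat) : ∀ cs : List Char, cs.length ≤ n → sepA cs = splitB [] cs := by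
  induction n with
  | zero =>
      intro cs hlen
      have : cs = [] := List.eq_nil_of_length_eq_zero (Nat.le_zero.mp hlen)
      subst this
      simp [sepA, splitB]
  | succ n ih =>
      intro cs hlen
      rw [sepA]
      split
      next h =>
        rw [splitB_no_comma cs (by simpa [List.findIdx?_eq_none_iff] using h)]
        simp
      next i h =>
        obtain ⟨hi, hpi, hlt⟩ := List.findIdx?_eq_some_iff_getElem.mp h
        have hdec : cs = cs.take i ++ ',' :: cs.drop (i + 1) := by
          conv_lhs => rw [← List.take_append_drop i cs]
          rw [List.drop_eq_getElem_cons hi]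
          simp at hpi
          rw [hpi]
        have hnotc : ∀ c ∈ cs.take i, c ≠ ',' := by
          intro c hcmem
          obtain ⟨j, hj, hje⟩ := List.getElem_of_mem hcmem
          simp at hj
          have := hlt j hj.1
          simp only [List.getElem_take] at hje
          simp at this
          rw [← hje]
          exact this
        rw [ih (cs.drop (i + 2)) (by simp [List.length_drop]; omega)]
        conv_rhs => rw [hdec]
        rw [splitB_across _ _ hnotc]
        simp [List.drop_drop]

theorem sepA_eq_splitB (cs : List Char) : sepA cs = splitB [] cs :=
  sepA_eq_splitB_aux cs.length cs le_rfl

theorem optaA_eq_reverse_aux (n : Nat) : ∀ l : List (List Char), l.length ≤ n → optaA l = l.reverse := by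
  induction n with
  | zero =>
      intro l hlen
      have : l = [] := List.eq_nil_of_length_eq_zero (Nat.le_zero.mp hlen)
      subst this
      simp [optaA]
  | succ n ih =>
      intro l hlen
      rw [optaA]
      split
      next h => simp [h]
      next h =>
        rw [ih l.dropLast (by simp [List.length_dropLast]; omega)]
        conv_rhs => rw [← List.dropLast_concat_getLast h]
        simp

theorem optaA_eq_reverse (l : List (List Char)) : optaA l = l.reverse :=
  optaA_eq_reverse_aux l.length l le_rfl

theorem enumerate_map {α β : Type} (f : α → β) (l : List α) (s : Int) :
    PySem.List.enumerate (l.map f) s = (PySem.List.enumerate l s).map (fun p => (p.1, f p.2)) := by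
  induction l generalizing s with
  | nil => simp [PySem.List.enumerate_nil]
  | cons a l ih => simp [PySem.List.enumerate_cons, ih]

theorem orderUpA_enum (os : List (List Char)) (c : Int) :
    ∀ s : Int, orderUpA (c + s + os.length) os
      = (PySem.List.enumerate os s).flatMap (fun p =>
          fmtMsg (c + 1 + p.1) ((splitB [] p.2).reverse) ++ ['\n']) := by
  induction os with
  | nil => intro s; simp [orderUpA, PySem.List.enumerate_nil]
  | cons o rest ih =>
      intro s
      simp only [orderUpA, PySem.List.enumerate_cons, List.flatMap_cons]
      have h1 : c + s + ((o :: rest).length : Int) - ((o :: rest).length : Int) + 1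
          = c + 1 + s := by ring
      have h2 : c + s + ((o :: rest).length : Int) = c + (s + 1) + (rest.length : Int) := by
        simp only [List.length_cons]; push_cast; ring
      rw [h1, h2, ih (s + 1)]
      rw [optaA_eq_reverse, sepA_eq_splitB]

-- ===== VERDICT (by name: the statement is the Claim_ definition above) =====
theorem orderUp_spec : Claim_equal_orderUp := by
  intro totalNum orders _
  unfold Spec_orderUp orderUp orderUp_alt
  have h := orderUpA_enum (orders.map String.toList) (totalNum - (orders.length : Int)) 0
  simp only [List.length_map] at h
  have harg : totalNum - (orders.length : Int) + 0 + (orders.length : Int) = totalNum := by ring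
  rw [harg] at h
  rw [h, enumerate_map, List.flatMap_map]
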